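-- pv_equiv track=rewrite | github.com/sarishtshreshth0/plag_extract | Project_CodeNet_Python800/p02866/s420501690.py | solve
-- ===== SOURCE A (Python) =====
-- from collections import Counter
--
-- def solve(n, ddd):
--     if ddd[0] != 0:
--         return 0
--     cnt = Counter(ddd)
--     if cnt[0] != 1:
--         return 0
--     max_c = max(cnt)
--     for i in range(max_c + 1):
--         if i not in cnt:
--             return 0
--
--     MOD = 998244353
--     ans = 1
--     for i in range(max_c):
--         prev = cnt[i]
--         curr = cnt[i + 1]
--         ans = ans * pow(prev, curr, MOD) % MOD
--     return ans
-- ===== SOURCE B (Python) =====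
-- def solve(n, ddd):
--     # Count trees directly: each non-root node at distance d independently picks
--     # any of the cnt[d-1] nodes one level closer as its parent, so the answer is
--     # the product of cnt[v-1] over all entries v >= 1, once the distance profile
--     # is valid (unique root at distance 0, no gap below any occupied level).
--     MOD = 998244353
--     if ddd[0] != 0:
--         return 0
--     cnt = {}
--     for v in ddd:
--         cnt[v] = cnt.get(v, 0) + 1
--     if cnt[0] != 1:
--         return 0
--     for v in cnt:
--         if v > 0 and v - 1 not in cnt:
--             return 0
--     ans = 1
--     for v in ddd:
--         if v > 0:
--             ans = ans * cnt[v - 1] % MOD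
--     return ans
-- ===== Notes on version B (the rewrite author's own statement) =====
-- stated objective: alternative
-- what changed: B multiplies the parent-level count cnt[v-1] once per array element in a single pass instead of computing pow(cnt[i], cnt[i+1], MOD) per distance level, and validates the profile by a per-key predecessor check (v>0 implies v-1 present) instead of computing max and scanning range(max+1); Pre_ excludes only the empty list, on which A raises IndexError.
import Mathlib
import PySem

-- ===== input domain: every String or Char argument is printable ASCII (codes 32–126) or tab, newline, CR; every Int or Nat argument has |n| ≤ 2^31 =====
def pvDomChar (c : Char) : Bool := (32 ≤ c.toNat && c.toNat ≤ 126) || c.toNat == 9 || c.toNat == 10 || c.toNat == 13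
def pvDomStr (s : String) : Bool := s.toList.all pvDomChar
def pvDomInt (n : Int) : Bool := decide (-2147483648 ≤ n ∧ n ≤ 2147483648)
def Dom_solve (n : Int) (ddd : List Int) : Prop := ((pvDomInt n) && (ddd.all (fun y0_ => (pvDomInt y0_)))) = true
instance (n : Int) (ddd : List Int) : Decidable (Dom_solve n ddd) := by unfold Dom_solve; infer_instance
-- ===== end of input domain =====

-- B replaces A's per-level pow(cnt[i], cnt[i+1], MOD) product and max/range gap scan by a
-- per-element product of cnt[v-1] and a per-key predecessor check (alternative decomposition).

-- ===== PORT A =====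
def solve (n : Int) (ddd : List Int) : Int :=
  match PySem.List.pyGet? ddd 0 with
  | none => 0   -- ddd[0] raises IndexError on []; excluded by Pre_solve
  | some d0 =>
    if d0 ≠ 0 then 0
    else
      let cnt := PySem.Dict.counter ddd
      if cnt.getD 0 0 ≠ 1 then 0
      else
        match PySem.List.max? cnt.keys (fun k => k) with
        | none => 0   -- max() on empty dict raises ValueError; unreachable (0 is a key here)
        | some max_c =>
          if (PySem.List.pyRange 0 (max_c + 1)).all (fun i => cnt.contains i) then
            (PySem.List.pyRange 0 max_c).foldl
              (fun ans i =>
                PySem.Int.mod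
                  (ans * PySem.Int.powMod (cnt.getD i 0) (cnt.getD (i + 1) 0).toNat 998244353)
                  998244353) 1
          else 0

-- ===== PORT B =====
def solve_alt (n : Int) (ddd : List Int) : Int :=
  match PySem.List.pyGet? ddd 0 with
  | none => 0   -- ddd[0] raises IndexError on []; excluded by Pre_solve
  | some d0 =>
    if d0 ≠ 0 then 0
    else
      let cnt := ddd.foldl (fun d v => d.insert v (d.getD v 0 + 1)) PySem.Dict.empty
      match cnt.get? 0 with
      | none => 0   -- cnt[0] would raise KeyError; unreachable, since ddd[0] == 0 here
      | some z =>
        if z ≠ 1 then 0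
        else
          if cnt.keys.all (fun v => decide (v ≤ 0) || cnt.contains (v - 1)) then
            ddd.foldl
              (fun ans v =>
                if 0 < v then PySem.Int.mod (ans * cnt.getD (v - 1) 0) 998244353 else ans) 1
          else 0

-- ===== PRECONDITION & SPEC =====
-- A (and B) raise IndexError on the empty list; Pre_ excludes exactly that input.
def Pre_solve (n : Int) (ddd : List Int) : Prop := ddd ≠ []
instance (n : Int) (ddd : List Int) : Decidable (Pre_solve n ddd) := by unfold Pre_solve; infer_instance
def pvWitness_solve : Int × List Int := (4, [0, 1, 1, 2])
def Spec_solve (n : Int) (ddd : List Int) (out : Int) : Prop := out = solve_alt n ddd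
instance (n : Int) (ddd : List Int) (out : Int) : Decidable (Spec_solve n ddd out) := by unfold Spec_solve; infer_instance

-- ===== CLAIM (what is proved, stated in full; the proofs are below) =====
def Claim_equal_solve : Prop := ∀ (n : Int) (ddd : List Int), Dom_solve n ddd → Pre_solve n ddd → Spec_solve n ddd (solve n ddd)

-- ===== LEMMAS AND PROOFS =====

-- product over distance levels 0..k-1 of g(level)^(cnt of level+1)
def levelProd (g : Int → Int) (cntf : Int → ℕ) : ℕ → Int
  | 0 => 1
  | k + 1 => levelProd g cntf k * g (k : Int) ^ cntf ((k : Int) + 1)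

theorem levelProd_congr (g : Int → Int) (c1 c2 : Int → ℕ) :
    ∀ m : ℕ, (∀ x : Int, 1 ≤ x → x ≤ (m : Int) → c1 x = c2 x) →
      levelProd g c1 m = levelProd g c2 m := by
  intro m
  induction m with
  | zero => intro _; rfl
  | succ k ih =>
    intro h
    have h1 : c1 ((k : Int) + 1) = c2 ((k : Int) + 1) := by
      apply h <;> push_cast <;> omega
    simp only [levelProd, h1, ih (fun x hx1 hx2 => h x hx1 (by push_cast at hx2 ⊢; omega))]

theorem levelProd_zero_cnt (g : Int → Int) : ∀ m : ℕ, levelProd g (fun _ => 0) m = 1 := by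
  intro m
  induction m with
  | zero => rfl
  | succ k ih => simp [levelProd, ih]

theorem levelProd_bump (g : Int → Int) (cntf : Int → ℕ) (v : Int) (hv : 1 ≤ v) :
    ∀ m : ℕ, v ≤ (m : Int) →
      levelProd g (fun x => cntf x + (if v = x then 1 else 0)) m = g (v - 1) * levelProd g cntf m := by
  intro m
  induction m with
  | zero => intro h; exfalso; omega
  | succ k ih =>
    intro h
    by_cases hk : v ≤ (k : Int)
    · have hne : v ≠ (k : Int) + 1 := by omega
      simp only [levelProd, ih hk, if_neg hne, add_zero]
      ring
    · have hv' : v = (k : Int) + 1 := by push_cast at h; omega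
      have hcongr : levelProd g (fun x => cntf x + (if v = x then 1 else 0)) k
          = levelProd g cntf k := by
        apply levelProd_congr
        intro x hx1 hx2
        have hxv : v ≠ x := by omega
        simp [hxv]
      simp only [levelProd, hcongr, if_pos hv']
      have hg : g (v - 1) = g (k : Int) := by rw [hv']; ring_nf
      rw [hg, pow_succ]
      ring

-- the per-node product over the positive entries groups into the per-level product
theorem core_prod (g : Int → Int) (m : ℕ) :
    ∀ l : List Int, (∀ v ∈ l, 0 < v → v ≤ (m : Int)) →
      ((l.filter (fun v => decide (0 < v))).map (fun v => g (v - 1))).prod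
        = levelProd g (fun x => l.count x) m := by
  intro l
  induction l with
  | nil =>
    intro _
    simp only [List.filter_nil, List.map_nil, List.prod_nil, List.count_nil]
    exact (levelProd_zero_cnt g m).symm
  | cons v l ih =>
    intro h
    have hcnt : (fun x : Int => (v :: l).count x)
        = fun x : Int => l.count x + (if v = x then 1 else 0) := by
      funext x
      simp only [List.count_cons, beq_iff_eq]
    by_cases hv : 0 < v
    · have hvm : v ≤ (m : Int) := h v List.mem_cons_self hv
      rw [List.filter_cons_of_pos (by simpa using hv), List.map_cons, List.prod_cons, hcnt,
        levelProd_bump g (fun x => l.count x) v (by omega) m hvm,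
        ih (fun w hw hw' => h w (List.mem_cons_of_mem _ hw) hw')]
    · rw [List.filter_cons_of_neg (by simpa using hv), hcnt,
        ih (fun w hw hw' => h w (List.mem_cons_of_mem _ hw) hw')]
      apply levelProd_congr
      intro x hx1 _
      have hxv : v ≠ x := by omega
      simp [hxv]

theorem mulmod_left (a b : Int) : a % 998244353 * b % 998244353 = a * b % 998244353 := by
  conv_lhs => rw [Int.mul_emod]
  conv_rhs => rw [Int.mul_emod]
  rw [Int.emod_emod_of_dvd _ dvd_rfl]

theorem mulmod_right (a b : Int) : a * (b % 998244353) % 998244353 = a * b % 998244353 := by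
  conv_lhs => rw [Int.mul_emod]
  conv_rhs => rw [Int.mul_emod]
  rw [Int.emod_emod_of_dvd _ dvd_rfl]

-- a mod-multiplying fold is the product mod 998244353
theorem foldMul (f : Int → Int) :
    ∀ (l : List Int) (a : Int),
      l.foldl (fun ans v => ans * f v % 998244353) (a % 998244353)
        = a * (l.map f).prod % 998244353 := by
  intro l
  induction l with
  | nil => intro a; simp
  | cons v l ih =>
    intro a
    simp only [List.foldl_cons, List.map_cons, List.prod_cons]
    rw [mulmod_left, ih (a * f v), mul_assoc]

theorem foldMul1 (f : Int → Int) (l : List Int) :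
    l.foldl (fun ans v => ans * f v % 998244353) 1 = (l.map f).prod % 998244353 := by
  have h := foldMul f l 1
  rw [show (1 : Int) % 998244353 = 1 from by decide, one_mul] at h
  exact h

-- A's per-level fold equals levelProd mod 998244353
theorem foldA (g : Int → Int) (cntf : Int → ℕ) :
    ∀ k : ℕ,
      (PySem.List.pyRange 0 (k : Int)).foldl
          (fun ans i => ans * (g i ^ cntf (i + 1) % 998244353) % 998244353) 1
        = levelProd g cntf k % 998244353 := by
  intro k
  induction k with
  | zero =>
    rw [show ((0 : ℕ) : Int) = 0 from rfl, PySem.List.pyRange_one_eq_nil le_rfl]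
    simp only [List.foldl_nil, levelProd]
    decide
  | succ k ih =>
    rw [show ((k + 1 : ℕ) : Int) = (k : Int) + 1 from by push_cast; ring,
      PySem.List.pyRange_one_succ_right (by exact_mod_cast Nat.zero_le k),
      List.foldl_append, ih]
    simp only [List.foldl_cons, List.foldl_nil]
    rw [mulmod_left, mulmod_right]
    simp [levelProd]

-- B's guarded fold is the fold over the positive entries
theorem foldB (f : Int → Int) :
    ∀ (l : List Int) (a : Int),
      l.foldl (fun ans v => if 0 < v then ans * f v % 998244353 else ans) a
        = (l.filter (fun v => decide (0 < v))).foldl (fun ans v => ans * f v % 998244353) a := by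
  intro l
  induction l with
  | nil => intro a; rfl
  | cons v l ih =>
    intro a
    by_cases hv : 0 < v <;> simp [hv, ih]

-- descending chain: if every positive member has its predecessor, everything below a member is a member
theorem descend (l : List Int) (hcl : ∀ v ∈ l, 0 < v → v - 1 ∈ l) (m : Int) (hm : m ∈ l) :
    ∀ i : Int, 0 ≤ i → i ≤ m → i ∈ l := by
  have key : ∀ k : ℕ, ∀ i : Int, 0 ≤ i → i ≤ m → (m - i).toNat = k → i ∈ l := by
    intro k
    induction k with
    | zero =>
      intro i h0 him hk
      have him' : i = m := by omega
      exact him' ▸ hm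
    | succ k ih =>
      intro i h0 him hk
      have h2 : i + 1 ∈ l := ih (i + 1) (by omega) (by omega) (by omega)
      have h3 := hcl (i + 1) h2 (by omega)
      simpa using h3
  intro i h0 him
  exact key (m - i).toNat i h0 him rfl

theorem solve_eq (n : Int) (ddd : List Int) (hpre : ddd ≠ []) : solve n ddd = solve_alt n ddd := by
  cases ddd with
  | nil => exact absurd rfl hpre
  | cons d t =>
    have h0 : PySem.List.pyGet? (d :: t) 0 = some d := by
      simp [PySem.List.pyGet?, PySem.List.pyIdx?]
    by_cases hd : d = 0
    · subst hd
      simp only [solve, solve_alt, h0, PySem.Dict.foldl_insert_getD_add_one_eq_counter,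
        ne_eq, not_true_eq_false, if_false]
      set c := PySem.Dict.counter ((0 : Int) :: t) with hc
      have hmem0 : (0 : Int) ∈ ((0 : Int) :: t) := List.mem_cons_self
      have hget0 : c.getD 0 0 = (((0 : Int) :: t).count 0 : Int) := by
        rw [hc]; exact PySem.Dict.getD_counter _ _
      have hcont0 : c.contains 0 = true := by
        rw [hc, PySem.Dict.contains_counter]
        exact List.contains_iff_mem.mpr hmem0
      have hzex : ∃ z, c.get? 0 = some z := by
        rw [PySem.Dict.contains_eq_isSome_get?] at hcont0
        exact Option.isSome_iff_exists.mp hcont0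
      obtain ⟨z, hz⟩ := hzex
      have hzval : z = (((0 : Int) :: t).count 0 : Int) := by
        have hG : c.getD 0 0 = z := by rw [PySem.Dict.getD_eq_get?_getD, hz]; rfl
        rw [← hG, hget0]
      rw [hz]
      simp only [hget0, hzval]
      by_cases h1 : ((((0 : Int) :: t).count 0 : ℕ) : Int) = 1
      · rw [if_neg (not_not_intro h1), if_neg (not_not_intro h1)]
        have hkey0 : (0 : Int) ∈ c.keys := by
          rw [hc, PySem.Dict.keys_counter, PySem.Set.mem_ofList]
          exact hmem0
        cases hmax : PySem.List.max? c.keys (fun k => k) with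
        | none =>
          exfalso
          rw [PySem.List.max?_eq_none_iff] at hmax
          rw [hmax] at hkey0
          exact absurd hkey0 (List.not_mem_nil)
        | some mC =>
          have hmemkeys : ∀ x : Int, x ∈ c.keys ↔ x ∈ ((0 : Int) :: t) := by
            intro x
            rw [hc, PySem.Dict.keys_counter, PySem.Set.mem_ofList]
          have hmCmem : mC ∈ ((0 : Int) :: t) := (hmemkeys mC).mp (PySem.List.max?_mem hmax)
          have hub : ∀ y ∈ ((0 : Int) :: t), y ≤ mC := fun y hy =>
            PySem.List.max?_isMax hmax y ((hmemkeys y).mpr hy)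
          have hmC0 : (0 : Int) ≤ mC := hub 0 hmem0
          have hcontmem : ∀ x : Int, c.contains x = true ↔ x ∈ ((0 : Int) :: t) := by
            intro x
            rw [hc, PySem.Dict.contains_counter]
            exact List.contains_iff_mem
          have hcheck : ((PySem.List.pyRange 0 (mC + 1)).all fun i => c.contains i)
              = (c.keys.all fun v => decide (v ≤ 0) || c.contains (v - 1)) := by
            rw [Bool.eq_iff_iff]
            simp only [List.all_eq_true, PySem.List.mem_pyRange_one, Bool.or_eq_true,
              decide_eq_true_eq]
            constructor
            · intro h v hv
              by_cases hv0 : v ≤ 0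
              · exact Or.inl hv0
              · right
                have hvmem : v ∈ ((0 : Int) :: t) := (hmemkeys v).mp hv
                have hvub : v ≤ mC := hub v hvmem
                exact h (v - 1) ⟨by omega, by omega⟩
            · intro h i hi
              rw [hcontmem]
              refine descend ((0 : Int) :: t) ?_ mC hmCmem i hi.1 (by omega)
              intro w hw hw0
              rcases h w ((hmemkeys w).mpr hw) with h' | h'
              · omega
              · exact (hcontmem _).mp h'
          simp only [hcheck]
          by_cases hok : (c.keys.all fun v => decide (v ≤ 0) || c.contains (v - 1)) = true
          · rw [if_pos hok, if_pos hok]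
            have hpred : ∀ w ∈ ((0 : Int) :: t), 0 < w → w - 1 ∈ ((0 : Int) :: t) := by
              rw [List.all_eq_true] at hok
              intro w hw hw0
              have h' := hok w ((hmemkeys w).mpr hw)
              simp only [Bool.or_eq_true, decide_eq_true_eq] at h'
              rcases h' with h' | h'
              · omega
              · exact (hcontmem _).mp h'
            have hAfun : (fun (ans i : Int) =>
                  PySem.Int.mod
                    (ans * PySem.Int.powMod (c.getD i 0) (c.getD (i + 1) 0).toNat 998244353)
                    998244353)
                = fun (ans i : Int) =>
                    ans * ((((0 : Int) :: t).count i : Int) ^ ((0 : Int) :: t).count (i + 1)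
                      % 998244353) % 998244353 := by
              funext ans i
              rw [hc, PySem.Dict.getD_counter, PySem.Dict.getD_counter,
                PySem.Int.powMod_eq_emod _ _ (by norm_num : (0 : Int) < 998244353),
                PySem.Int.mod_eq_emod_of_pos (by norm_num), Int.toNat_natCast, mulmod_right]
            have hBfun : (fun (ans v : Int) =>
                  if 0 < v then PySem.Int.mod (ans * c.getD (v - 1) 0) 998244353 else ans)
                = fun (ans v : Int) =>
                    if 0 < v then ans * (((0 : Int) :: t).count (v - 1) : Int) % 998244353
                    else ans := by
              funext ans v
              rw [hc, PySem.Dict.getD_counter, PySem.Int.mod_eq_emod_of_pos (by norm_num)]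
            rw [hAfun, hBfun]
            have hmCtn : mC = ((mC.toNat : ℕ) : Int) := (Int.toNat_of_nonneg hmC0).symm
            have hA : (PySem.List.pyRange 0 mC).foldl
                  (fun ans i =>
                    ans * ((((0 : Int) :: t).count i : Int) ^ ((0 : Int) :: t).count (i + 1)
                      % 998244353) % 998244353) 1
                = levelProd (fun j => (((0 : Int) :: t).count j : Int))
                    (fun x => ((0 : Int) :: t).count x) mC.toNat % 998244353 := by
              rw [hmCtn]
              exact foldA (fun j => (((0 : Int) :: t).count j : Int))
                (fun x => ((0 : Int) :: t).count x) mC.toNat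
            have hbound : ∀ v ∈ ((0 : Int) :: t), 0 < v → v ≤ ((mC.toNat : ℕ) : Int) := by
              intro v hv _
              rw [← hmCtn]
              exact hub v hv
            have hB : (((0 : Int) :: t).foldl
                  (fun ans v =>
                    if 0 < v then ans * (((0 : Int) :: t).count (v - 1) : Int) % 998244353
                    else ans) 1)
                = levelProd (fun j => (((0 : Int) :: t).count j : Int))
                    (fun x => ((0 : Int) :: t).count x) mC.toNat % 998244353 := by
              rw [foldB, foldMul1,
                core_prod (fun j => (((0 : Int) :: t).count j : Int)) mC.toNat
                  ((0 : Int) :: t) hbound]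
            rw [hA, hB]
          · rw [if_neg hok, if_neg hok]
      · rw [if_pos h1, if_pos h1]
    · simp [solve, solve_alt, hd]

-- ===== VERDICT (by name: the statement is the Claim_ definition above) =====
theorem solve_spec : Claim_equal_solve := by
  intro n ddd _ hpre
  unfold Spec_solve
  exact solve_eq n ddd hpre
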